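-- pv_equiv track=rewrite | github.com/ispeciadev/Email_ValidatorApp | backend/validator/fast_validator.py | validate_yahoo_username
-- ===== SOURCE A (Python) =====
-- def validate_yahoo_username(local_part: str) -> bool:
--     """
--     Validate Yahoo username rules.
--     Yahoo rules:
--     - 4-32 characters
--     - Letters, numbers, underscores, dots
--     - Must start with a letter
--     - Plus addressing is supported
--     """
--     # Handle plus addressing
--     base_part = local_part.split('+')[0] if '+' in local_part else local_part
--
--     if len(base_part) < 4 or len(base_part) > 32:
--         return False
--
--     if not base_part[0].isalpha():
--         return False
--
--     # Only alphanumeric, underscore, dot in base part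
--     allowed = set('abcdefghijklmnopqrstuvwxyz0123456789_.')
--     if not all(c in allowed for c in base_part.lower()):
--         return False
--
--     return True
-- ===== SOURCE B (Python) =====
-- def validate_yahoo_username(local_part: str) -> bool:
--     # Single left-to-right pass: stop at '+', classify each character by code
--     # range on the fly, and count; no base string is ever materialized.
--     n = 0
--     for c in local_part:
--         if c == '+':
--             break
--         if n == 0:
--             if not ('A' <= c <= 'Z' or 'a' <= c <= 'z'):
--                 return False
--         elif not ('a' <= c <= 'z' or 'A' <= c <= 'Z'
--                   or '0' <= c <= '9' or c == '_' or c == '.'):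
--             return False
--         n += 1
--         if n > 32:
--             return False
--     return n >= 4
-- ===== Notes on version B (the rewrite author's own statement) =====
-- stated objective: alternative
-- what changed: B is a single left-to-right pass with a position counter that stops at '+', classifies each character by ASCII code ranges on the fly and early-returns, instead of A's staged passes (split to materialize the base string, length check, first-char isalpha, then a lowercase copy scanned against a set).
import Mathlib
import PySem

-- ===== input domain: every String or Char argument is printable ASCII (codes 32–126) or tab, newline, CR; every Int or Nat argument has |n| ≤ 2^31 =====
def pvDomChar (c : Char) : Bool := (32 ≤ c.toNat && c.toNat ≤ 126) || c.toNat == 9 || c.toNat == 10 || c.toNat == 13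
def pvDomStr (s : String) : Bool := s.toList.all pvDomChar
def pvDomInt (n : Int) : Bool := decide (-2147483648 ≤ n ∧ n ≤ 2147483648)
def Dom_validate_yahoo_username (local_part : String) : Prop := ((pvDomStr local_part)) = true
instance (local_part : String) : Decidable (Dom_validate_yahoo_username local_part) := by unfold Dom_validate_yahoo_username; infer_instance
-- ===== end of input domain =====

-- B validates in one left-to-right pass with a position counter (stop at '+', code-range
-- character tests, early returns) instead of A's staged split/length/isalpha/set-scan (alternative).


-- ===== PORT A =====
-- allowed = set('abcdefghijklmnopqrstuvwxyz0123456789_.')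
def pvAllowedA : PySem.Set Char := PySem.Set.ofList "abcdefghijklmnopqrstuvwxyz0123456789_.".toList

def validate_yahoo_username (local_part : String) : Bool :=
  let lp := local_part.toList
  -- base_part = local_part.split('+')[0] if '+' in local_part else local_part
  -- (str.split(sep) always returns a nonempty list, so its [0] is the head)
  let base := if PySem.Chars.isIn ['+'] lp then (PySem.Chars.splitOn lp ['+']).headD [] else lp
  if base.length < 4 || 32 < base.length then false
  else if !(match base with
            | [] => false            -- unreachable: base has length ≥ 4 here (Python base_part[0])
            | c :: _ => PySem.Chars.isalpha c) then false
  else if !((PySem.Chars.lower base).all (fun ch => pvAllowedA.contains ch)) then false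
  else true

-- ===== PORT B =====
-- 'A' <= c <= 'Z' etc. : Python chained single-char string comparisons = code-point range tests
def pvIsAlphaAscii (c : Char) : Bool :=
  (decide ('A' ≤ c) && decide (c ≤ 'Z')) || (decide ('a' ≤ c) && decide (c ≤ 'z'))

def pvIsAllowedB (c : Char) : Bool :=
  (decide ('a' ≤ c) && decide (c ≤ 'z')) || (decide ('A' ≤ c) && decide (c ≤ 'Z')) ||
  (decide ('0' ≤ c) && decide (c ≤ '9')) || c == '_' || c == '.'

-- the for-loop of Source B with its counter n, step for step
def pvAltGo : List Char → Int → Bool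
  | [], n => decide (n ≥ 4)
  | c :: rest, n =>
    if c = '+' then decide (n ≥ 4)
    else if n = 0 then
      if !(pvIsAlphaAscii c) then false
      else if n + 1 > 32 then false else pvAltGo rest (n + 1)
    else if !(pvIsAllowedB c) then false
    else if n + 1 > 32 then false else pvAltGo rest (n + 1)

def validate_yahoo_username_alt (local_part : String) : Bool :=
  pvAltGo local_part.toList 0

-- ===== PRECONDITION & SPEC =====
def Spec_validate_yahoo_username (local_part : String) (out : Bool) : Prop := out = validate_yahoo_username_alt local_part
instance (local_part : String) (out : Bool) : Decidable (Spec_validate_yahoo_username local_part out) := by unfold Spec_validate_yahoo_username; infer_instance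

-- ===== CLAIM (what is proved, stated in full; the proofs are below) =====
def Claim_equal_validate_yahoo_username : Prop := ∀ (local_part : String), Dom_validate_yahoo_username local_part → Spec_validate_yahoo_username local_part (validate_yahoo_username local_part)

-- ===== LEMMAS AND PROOFS =====

-- once the accumulator is nonempty, the head of splitOn.go's result is the accumulator's last entry
lemma pv_go_head_acc (sep : List Char) (fuel : Nat) :
    ∀ (l cur : List Char) (acc : List (List Char)), acc ≠ [] →
      (PySem.Chars.splitOn.go sep fuel l cur acc).headD [] = acc.getLastD [] := by
  induction fuel with
  | zero =>
    intro l cur acc h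
    cases acc with
    | nil => exact absurd rfl h
    | cons a as =>
      simp [PySem.Chars.splitOn.go, List.head?_reverse, List.getLastD_eq_getLast?,
        List.getLast?_cons]
  | succ fuel ih =>
    intro l cur acc h
    cases l with
    | nil =>
      cases acc with
      | nil => exact absurd rfl h
      | cons a as =>
        simp [PySem.Chars.splitOn.go, List.head?_reverse, List.getLastD_eq_getLast?,
          List.getLast?_cons]
    | cons c rest =>
      rw [PySem.Chars.splitOn.go]
      split
      · rw [ih _ _ _ (by simp)]
        cases acc with
        | nil => exact absurd rfl h
        | cons a as => simp [List.getLastD_eq_getLast?, List.getLast?_cons]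
      · exact ih _ _ _ h

-- with enough fuel and an empty accumulator, the head of splitOn.go is cur.reverse ++ takeWhile
lemma pv_go_head (fuel : Nat) :
    ∀ (l cur : List Char), l.length ≤ fuel →
      (PySem.Chars.splitOn.go ['+'] fuel l cur []).headD []
        = cur.reverse ++ l.takeWhile (fun c => c ≠ '+') := by
  induction fuel with
  | zero =>
    intro l cur h
    have : l = [] := List.eq_nil_of_length_eq_zero (Nat.le_zero.mp h)
    subst this
    simp [PySem.Chars.splitOn.go]
  | succ fuel ih =>
    intro l cur h
    cases l with
    | nil => simp [PySem.Chars.splitOn.go]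
    | cons c rest =>
      rw [PySem.Chars.splitOn.go]
      by_cases hc : c = '+'
      · subst hc
        rw [if_pos (by simp [List.isPrefixOf])]
        rw [pv_go_head_acc _ _ _ _ _ (by simp)]
        simp [List.takeWhile]
      · rw [if_neg (by simp [List.isPrefixOf]; exact fun h' => hc h'.symm)]
        rw [ih rest (c :: cur) (by simpa using Nat.le_of_succ_le_succ h)]
        rw [List.takeWhile_cons_of_pos (by simpa using hc)]
        simp

-- a list without '+' is its own takeWhile
lemma pv_takeWhile_of_not_mem (l : List Char) (h : '+' ∉ l) :
    l.takeWhile (fun c => c ≠ '+') = l := by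
  induction l with
  | nil => rfl
  | cons a as ih =>
    simp only [List.mem_cons, not_or] at h
    have hne : a ≠ '+' := fun h' => h.1 h'.symm
    rw [List.takeWhile_cons_of_pos (by simpa using hne), ih h.2]

-- A's base_part equals everything before the first '+'
lemma pv_base_eq (lp : List Char) :
    (if PySem.Chars.isIn ['+'] lp then (PySem.Chars.splitOn lp ['+']).headD [] else lp)
      = lp.takeWhile (fun c => c ≠ '+') := by
  split
  · show (PySem.Chars.splitOn.go ['+'] (lp.length + 1) lp [] []).headD [] = _
    rw [pv_go_head (lp.length + 1) lp [] (by omega)]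
    simp
  · rename_i hnot
    rw [pv_takeWhile_of_not_mem]
    intro hm
    obtain ⟨s, t, rfl⟩ := List.append_of_mem hm
    exact ((PySem.Chars.isIn_eq_false_iff _ _).mp (Bool.of_not_eq_true hnot)) ⟨s, t, by simp⟩

-- B's loop ignores everything from the first '+' on
lemma pv_altGo_takeWhile (l : List Char) : ∀ n : Int,
    pvAltGo l n = pvAltGo (l.takeWhile (fun c => c ≠ '+')) n := by
  induction l with
  | nil => intro n; rfl
  | cons c rest ih =>
    intro n
    by_cases hc : c = '+'
    · subst hc; simp [pvAltGo, List.takeWhile]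
    · rw [List.takeWhile_cons_of_pos (by simpa using hc)]
      simp only [pvAltGo, if_neg hc]
      split_ifs <;> first | rfl | exact ih _

-- on domain chars, lowercase membership in A's set coincides with B's range test
set_option maxRecDepth 8192 in
lemma pv_char_allowed (c : Char) (h : pvDomChar c = true) :
    pvAllowedA.contains (PySem.Chars.lowerChar c) = pvIsAllowedB c := by
  have hall : ∀ n : Nat, n < 127 →
      pvAllowedA.contains (PySem.Chars.lowerChar (Char.ofNat n)) = pvIsAllowedB (Char.ofNat n) := by
    unfold pvAllowedA pvIsAllowedB
    decide
  have hlt : c.toNat < 127 := by simp [pvDomChar] at h; omega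
  have hx := hall c.toNat hlt
  rwa [Char.ofNat_toNat] at hx

-- on domain chars, Python isalpha coincides with B's ASCII range test
set_option maxRecDepth 8192 in
lemma pv_char_alpha (c : Char) (h : pvDomChar c = true) :
    PySem.Chars.isalpha c = pvIsAlphaAscii c := by
  have hall : ∀ n : Nat, n < 127 →
      PySem.Chars.isalpha (Char.ofNat n) = pvIsAlphaAscii (Char.ofNat n) := by decide
  have hlt : c.toNat < 127 := by simp [pvDomChar] at h; omega
  have hx := hall c.toNat hlt
  rwa [Char.ofNat_toNat] at hx

-- an ASCII letter is an allowed character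
lemma pv_alpha_allowed (c : Char) (h : pvIsAlphaAscii c = true) : pvIsAllowedB c = true := by
  simp [pvIsAlphaAscii] at h
  simp [pvIsAllowedB]
  tauto

-- invariant of B's loop past the first character
lemma pv_altGo_char (rest : List Char) (hplus : '+' ∉ rest) : ∀ n : Int, 1 ≤ n → n ≤ 32 →
    pvAltGo rest n
      = (decide (4 ≤ n + rest.length) && decide (n + (rest.length : Int) ≤ 32)
          && rest.all pvIsAllowedB) := by
  induction rest with
  | nil =>
    intro n h1 h32
    simp only [pvAltGo, List.all_nil, List.length_nil, Bool.and_true, Nat.cast_zero]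
    have h32' : (n : Int) + 0 ≤ 32 := by omega
    rw [decide_eq_true (by omega : (n:Int) + 0 ≤ 32)]
    simp [ge_iff_le]
  | cons c t ih =>
    intro n h1 h32
    have hcne : c ≠ '+' := by
      intro h; exact hplus (h ▸ List.mem_cons_self ..)
    have htp : '+' ∉ t := fun h => hplus (List.mem_cons_of_mem _ h)
    have hn0 : ¬ (n = 0) := by omega
    simp only [pvAltGo, if_neg hcne, if_neg hn0]
    cases hca : pvIsAllowedB c with
    | false => simp [hca]
    | true =>
      by_cases h33 : n + 1 > 32
      · rw [if_pos h33]
        simp only [List.length_cons]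
        push_cast
        have e2 : decide (n + ((t.length : Int) + 1) ≤ 32) = false := by
          rw [decide_eq_false_iff_not]; omega
        simp [e2]
      · rw [if_neg h33, ih htp (n + 1) (by omega) (by omega)]
        simp only [List.length_cons, List.all_cons, hca, Bool.true_and]
        push_cast
        have harr : n + 1 + (t.length : Int) = n + ((t.length : Int) + 1) := by ring
        rw [harr]
        simp

-- on domain chars, the lowered-scan over a list equals B's range test on each element
lemma pv_lower_all (l : List Char) (h : ∀ c ∈ l, pvDomChar c = true) :
    (PySem.Chars.lower l).all (fun ch => pvAllowedA.contains ch) = l.all pvIsAllowedB := by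
  induction l with
  | nil => rfl
  | cons c t ih =>
    simp only [PySem.Chars.lower, List.map_cons, List.all_cons] at ih ⊢
    rw [pv_char_allowed c (h c (List.mem_cons_self ..)),
        ih (fun x hx => h x (List.mem_cons_of_mem _ hx))]

-- ===== VERDICT (by name: the statement is the Claim_ definition above) =====
theorem validate_yahoo_username_spec : Claim_equal_validate_yahoo_username := by
  intro s hdom
  unfold Spec_validate_yahoo_username validate_yahoo_username validate_yahoo_username_alt
  simp only [pv_base_eq]
  rw [pv_altGo_takeWhile]
  have hdomc : ∀ c ∈ s.toList.takeWhile (fun c => c ≠ '+'), pvDomChar c = true := by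
    intro c hc
    exact List.all_eq_true.mp hdom c ((List.takeWhile_sublist _).subset hc)
  have hplus : '+' ∉ s.toList.takeWhile (fun c => c ≠ '+') := by
    intro hm
    have := List.mem_takeWhile_imp hm
    simp at this
  revert hdomc hplus
  generalize s.toList.takeWhile (fun c => c ≠ '+') = base
  intro hdomc hplus
  cases base with
  | nil => simp [pvAltGo]
  | cons c t =>
    have hcd := hdomc c (List.mem_cons_self ..)
    have htd : ∀ x ∈ t, pvDomChar x = true := fun x hx => hdomc x (List.mem_cons_of_mem _ hx)
    have hcne : c ≠ '+' := by intro h; exact hplus (h ▸ List.mem_cons_self ..)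
    have htp : '+' ∉ t := fun h => hplus (List.mem_cons_of_mem _ h)
    have hmatch : (match c :: t with | [] => false | c :: _ => PySem.Chars.isalpha c)
        = PySem.Chars.isalpha c := rfl
    rw [hmatch, pv_char_alpha c hcd]
    cases hα : pvIsAlphaAscii c with
    | false =>
      simp [pvAltGo, hcne, hα]
    | true =>
      have hca : pvIsAllowedB c = true := pv_alpha_allowed c hα
      simp only [pvAltGo, if_neg hcne, hα, Bool.not_true, Bool.false_eq_true, if_true, if_false, zero_add]
      rw [pv_altGo_char t htp 1 (by norm_num) (by norm_num)]
      rw [pv_lower_all (c :: t) hdomc]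
      simp only [List.all_cons, hca, Bool.true_and, List.length_cons]
      by_cases h4 : 4 ≤ t.length + 1
      · by_cases h32 : t.length + 1 ≤ 32
        · rw [if_neg (by simp [List.length_cons]; omega)]
          have e1 : decide (4 ≤ (1 : Int) + t.length) = true := by
            rw [decide_eq_true_iff]; push_cast; omega
          have e2 : decide ((1 : Int) + t.length ≤ 32) = true := by
            rw [decide_eq_true_iff]; push_cast; omega
          cases hta : t.all pvIsAllowedB <;> simp [hta, e1, e2]
        · rw [if_pos (by simp [List.length_cons]; omega)]
          have e2 : decide ((1 : Int) + t.length ≤ 32) = false := by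
            rw [decide_eq_false_iff_not]; push_cast; omega
          simp [e2]
      · rw [if_pos (by simp [List.length_cons]; omega)]
        have e1 : decide (4 ≤ (1 : Int) + t.length) = false := by
          rw [decide_eq_false_iff_not]; push_cast; omega
        simp [e1]
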